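-- pv_equiv track=rewrite | github.com/SoerenWilkening/speed-oriented-quantum-circuit-backend | tests/python/test_chess_walk.py | _get_depth_sets
-- ===== SOURCE A (Python) =====
-- def _get_depth_sets(max_depth):
--     """Helper: compute R_A and R_B depth sets for a given max_depth."""
--     # R_A: even depths, skip 0 (leaves) and max_depth (root)
--     r_a_depths = set()
--     for d in range(0, max_depth + 1, 2):
--         if d == 0:
--             continue  # skip leaves
--         if d == max_depth:
--             continue  # root belongs to R_B
--         r_a_depths.add(d)
--
--     # R_B: odd depths + root
--     r_b_depths = set(range(1, max_depth + 1, 2))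
--     if max_depth % 2 == 0:
--         r_b_depths.add(max_depth)
--
--     return r_a_depths, r_b_depths
-- ===== SOURCE B (Python) =====
-- def _get_depth_sets(max_depth):
--     """Helper: compute R_A and R_B depth sets for a given max_depth."""
--     # Single classification pass: interior depths go to R_A (even) or R_B (odd);
--     # the root depth always belongs to R_B.
--     r_a_depths, r_b_depths = set(), set()
--     for d in range(1, max_depth):
--         (r_a_depths if d % 2 == 0 else r_b_depths).add(d)
--     r_b_depths.add(max_depth)
--     return r_a_depths, r_b_depths
-- ===== Notes on version B (the rewrite author's own statement) =====
-- stated objective: simpler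
-- what changed: A builds the two sets with two separately-shaped constructions (a stepped even-range loop with two continue guards, plus a set(range) of odds and a conditional root insertion); B makes one classification pass over the interior depths 1..max_depth-1, routing each by parity, and always adds the root depth to R_B.
-- intended difference: For negative odd max_depth A returns two empty sets (its parity guard drops the root), while B returns ({}, {max_depth}); B's value is intended since A's own rule ('R_B: odd depths + root') and A's own behaviour on negative even inputs put the root depth in R_B. — e.g. on _get_depth_sets(-1): A returns ([], []), B returns ([], [-1])
import Mathlib
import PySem

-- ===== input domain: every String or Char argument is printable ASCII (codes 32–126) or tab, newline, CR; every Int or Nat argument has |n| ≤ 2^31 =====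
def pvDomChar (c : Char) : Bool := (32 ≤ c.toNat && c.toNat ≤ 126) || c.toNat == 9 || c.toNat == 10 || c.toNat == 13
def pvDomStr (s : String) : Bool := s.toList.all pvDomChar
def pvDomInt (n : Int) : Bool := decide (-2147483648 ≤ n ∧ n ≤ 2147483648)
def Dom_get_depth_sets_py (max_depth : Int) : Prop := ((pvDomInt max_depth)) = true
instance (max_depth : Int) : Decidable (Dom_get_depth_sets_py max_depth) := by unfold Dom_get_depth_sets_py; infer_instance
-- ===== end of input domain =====

-- B replaces A's two separately-shaped set constructions by one parity-classifying pass
-- over the interior depths plus an unconditional root insertion (objective: simpler).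

-- ===== PORT A =====
def get_depth_sets_py (max_depth : Int) : List Int × List Int :=
  let r_a : PySem.Set Int :=
    (PySem.List.pyRange 0 (max_depth + 1) 2).foldl
      (fun acc d =>
        if d = 0 then acc
        else if d = max_depth then acc
        else PySem.Set.add acc d)
      PySem.Set.empty
  let r_b0 : PySem.Set Int := PySem.Set.ofList (PySem.List.pyRange 1 (max_depth + 1) 2)
  let r_b : PySem.Set Int :=
    if PySem.Int.mod max_depth 2 = 0 then PySem.Set.add r_b0 max_depth else r_b0
  (r_a, r_b)

-- ===== PORT B =====
def get_depth_sets_py_alt (max_depth : Int) : List Int × List Int :=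
  let p : PySem.Set Int × PySem.Set Int :=
    (PySem.List.pyRange 1 max_depth 1).foldl
      (fun p d =>
        if PySem.Int.mod d 2 = 0 then (PySem.Set.add p.1 d, p.2)
        else (p.1, PySem.Set.add p.2 d))
      (PySem.Set.empty, PySem.Set.empty)
  (p.1, PySem.Set.add p.2 max_depth)

-- ===== PRECONDITION & SPEC =====
-- For negative odd max_depth A returns two empty sets (its parity guard drops the root),
-- while B returns ({}, {max_depth}); B's value is intended: A's own rule "R_B: odd depths
-- + root" (and A's own behaviour on negative even inputs) puts the root depth in R_B.
def D_get_depth_sets_py (max_depth : Int) : Prop :=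
  max_depth < 0 ∧ PySem.Int.mod max_depth 2 = 1
instance (max_depth : Int) : Decidable (D_get_depth_sets_py max_depth) := by
  unfold D_get_depth_sets_py; infer_instance

def Spec_get_depth_sets_py (max_depth : Int) (out : List Int × List Int) : Prop :=
  ¬ D_get_depth_sets_py max_depth → out = get_depth_sets_py_alt max_depth
instance (max_depth : Int) (out : List Int × List Int) :
    Decidable (Spec_get_depth_sets_py max_depth out) := by
  unfold Spec_get_depth_sets_py; infer_instance

def pvDiffWitness_get_depth_sets_py : Int := (-1)
def pvDiffWitnessOut_get_depth_sets_py : (List Int × List Int) × (List Int × List Int) :=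
  (([], []), ([], [-1]))

-- ===== CLAIM (what is proved, stated in full; the proofs are below) =====
def Claim_unchanged_get_depth_sets_py : Prop :=
  ∀ (max_depth : Int), Dom_get_depth_sets_py max_depth →
    Spec_get_depth_sets_py max_depth (get_depth_sets_py max_depth)
def Claim_changed_get_depth_sets_py : Prop :=
  Dom_get_depth_sets_py (pvDiffWitness_get_depth_sets_py) ∧
  D_get_depth_sets_py (pvDiffWitness_get_depth_sets_py) ∧
  get_depth_sets_py (pvDiffWitness_get_depth_sets_py) = pvDiffWitnessOut_get_depth_sets_py.1 ∧
  get_depth_sets_py_alt (pvDiffWitness_get_depth_sets_py) = pvDiffWitnessOut_get_depth_sets_py.2 ∧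
  pvDiffWitnessOut_get_depth_sets_py.1 ≠ pvDiffWitnessOut_get_depth_sets_py.2
def Claim_exact_get_depth_sets_py : Prop :=
  ∀ (max_depth : Int), Dom_get_depth_sets_py max_depth → D_get_depth_sets_py max_depth →
    get_depth_sets_py max_depth ≠ get_depth_sets_py_alt max_depth

-- ===== LEMMAS AND PROOFS =====

-- Folding `Set.add` under a guard over a list whose kept elements are fresh and distinct
-- appends exactly the kept elements.
lemma pv_foldl_addIf (P : Int → Prop) [DecidablePred P] :
    ∀ (L s : List Int), (L.filter (fun d => decide (P d))).Nodup →
      (∀ x ∈ L.filter (fun d => decide (P d)), x ∉ s) →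
      L.foldl (fun acc d => if P d then PySem.Set.add acc d else acc) s
        = s ++ L.filter (fun d => decide (P d)) := by
  intro L
  induction L with
  | nil => intro s _ _; simp
  | cons d L ih =>
    intro s hnd hdis
    by_cases hp : P d
    · simp only [List.filter_cons, hp, decide_true, if_true] at hnd hdis ⊢
      have hd : d ∉ s := hdis d (List.mem_cons_self ..)
      rw [List.foldl_cons, if_pos hp, PySem.Set.add_of_not_mem hd,
        ih (s ++ [d]) hnd.of_cons, List.append_assoc, List.singleton_append]
      intro x hx
      simp only [List.mem_append, List.mem_singleton]
      push Not
      exact ⟨hdis x (List.mem_cons_of_mem _ hx), fun h => (List.nodup_cons.mp hnd).1 (h ▸ hx)⟩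
    · simp only [List.filter_cons, hp, decide_false, Bool.false_eq_true, if_neg, not_false_iff] at hnd hdis ⊢
      rw [List.foldl_cons, if_neg hp, ih s hnd hdis]

lemma pv_neg_ranges (m : Int) (hm : m < 0) :
    (PySem.List.pyRange 0 (m + 1) 2 = [] ∧ PySem.List.pyRange 1 (m + 1) 2 = []
      ∧ PySem.List.pyRange 1 m 1 = []) := by
  rw [PySem.List.pyRange_of_pos _ _ (by norm_num), PySem.List.pyRange_of_pos _ _ (by norm_num),
    PySem.List.pyRange_one_eq_nil (by omega)]
  refine ⟨?_, ?_, rfl⟩ <;> rw [if_neg (by omega)] <;> rfl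


-- The pair-state fold of B splits into two independent guarded folds.
lemma pv_foldl_pair (L : List Int) (a b : List Int) :
    L.foldl
      (fun p d =>
        if PySem.Int.mod d 2 = 0 then (PySem.Set.add p.1 d, p.2)
        else (p.1, PySem.Set.add p.2 d))
      (a, b)
    = (L.foldl (fun acc d => if PySem.Int.mod d 2 = 0 then PySem.Set.add acc d else acc) a,
       L.foldl (fun acc d => if PySem.Int.mod d 2 = 0 then acc else PySem.Set.add acc d) b) := by
  induction L generalizing a b with
  | nil => rfl
  | cons d L ih =>
    simp only [List.foldl_cons]
    by_cases h : PySem.Int.mod d 2 = 0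
    · rw [if_pos h, if_pos h, if_pos h, ih]
    · rw [if_neg h, if_neg h, if_neg h, ih]

lemma pv_filter_odd (N : Nat) :
    (List.range N).filter (fun k => decide (k % 2 = 1)) = (List.range (N/2)).map (fun i => 2*i+1) := by
  induction N with
  | zero => rfl
  | succ N ih =>
    rw [List.range_succ, List.filter_append, ih]
    by_cases h : N % 2 = 1
    · have h2 : (N+1)/2 = N/2 + 1 := by omega
      rw [h2, List.range_succ, List.map_append]
      simp [h]
      omega
    · have h2 : (N+1)/2 = N/2 := by omega
      rw [h2]
      simp [h]

lemma pv_filter_even (N : Nat) :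
    (List.range N).filter (fun k => decide (k % 2 = 0)) = (List.range ((N+1)/2)).map (fun i => 2*i) := by
  induction N with
  | zero => rfl
  | succ N ih =>
    rw [List.range_succ, List.filter_append, ih]
    by_cases h : N % 2 = 0
    · have h2 : (N+1+1)/2 = (N+1)/2 + 1 := by omega
      rw [h2, List.range_succ, List.map_append]
      simp [h]
      omega
    · have h2 : (N+1+1)/2 = (N+1)/2 := by omega
      rw [h2]
      simp [h]

lemma pv_filter_pos (q : Nat) :
    (List.range (q+1)).filter (fun k => decide (¬ k = 0)) = (List.range q).map (fun i => i+1) := by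
  rw [List.range_succ_eq_map]
  simp [List.filter_map, Function.comp_def]

lemma pv_pos_case (n : Nat) (hn : 1 ≤ n) :
    get_depth_sets_py (n : Int) = get_depth_sets_py_alt (n : Int) := by
  -- the three raw ranges as maps over List.range
  have hgA : PySem.List.pyRange 0 ((n:Int)+1) 2
      = (List.range (n/2+1)).map (fun k : Nat => (2*(k:Int))) := by
    rw [PySem.List.pyRange_of_pos _ _ (by norm_num), if_pos (by omega : (0:Int) < (n:Int)+1),
      (by omega : (((n:Int)+1-0+2-1)/2).toNat = n/2+1)]
    exact List.map_congr_left (fun k _ => by ring)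
  have hgO : PySem.List.pyRange 1 ((n:Int)+1) 2
      = (List.range ((n+1)/2)).map (fun k : Nat => (2*(k:Int)+1)) := by
    rw [PySem.List.pyRange_of_pos _ _ (by norm_num), if_pos (by omega : (1:Int) < (n:Int)+1),
      (by omega : (((n:Int)+1-1+2-1)/2).toNat = (n+1)/2)]
    exact List.map_congr_left (fun k _ => by ring)
  have hgB : PySem.List.pyRange 1 (n:Int) 1
      = (List.range (n-1)).map (fun k : Nat => ((k:Int)+1)) := by
    rw [PySem.List.pyRange_one, (by omega : ((n:Int)-1).toNat = n-1)]
    exact List.map_congr_left (fun k _ => by ring)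
  -- A's r_a fold in guarded form
  have hbodyA : ∀ (L : List Int) (s : List Int),
      L.foldl (fun acc d => if d = 0 then acc else if d = (n:Int) then acc
        else PySem.Set.add acc d) s
      = L.foldl (fun acc d => if ¬(d = 0 ∨ d = (n:Int)) then PySem.Set.add acc d else acc) s := by
    intro L s
    refine PySem.List.foldl_congr_mem _ _ _ _ ?_
    intro acc x _
    by_cases h0 : x = 0
    · rw [if_pos h0, if_neg (by tauto)]
    · by_cases hm : x = (n:Int)
      · rw [if_neg h0, if_pos hm, if_neg (by tauto)]
      · rw [if_neg h0, if_neg hm, if_pos (by tauto)]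
  -- B's snd fold in guarded form
  have hbodyB : ∀ (L : List Int) (s : List Int),
      L.foldl (fun acc d => if PySem.Int.mod d 2 = 0 then acc else PySem.Set.add acc d) s
      = L.foldl (fun acc d => if ¬ PySem.Int.mod d 2 = 0 then PySem.Set.add acc d else acc) s := by
    intro L s
    refine PySem.List.foldl_congr_mem _ _ _ _ ?_
    intro acc x _
    by_cases h : PySem.Int.mod x 2 = 0
    · rw [if_pos h, if_neg (not_not_intro h)]
    · rw [if_neg h, if_pos h]
  -- B's value
  have hinj1 : Function.Injective (fun k : Nat => ((k:Int)+1)) := by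
    intro a b h; simpa using h
  have efst : (List.foldl (fun acc d => if PySem.Int.mod d 2 = 0 then PySem.Set.add acc d else acc)
      PySem.Set.empty ((List.range (n-1)).map (fun k : Nat => ((k:Int)+1))))
      = (List.range ((n-1)/2)).map (fun i : Nat => (2*(i:Int)+2)) := by
    rw [pv_foldl_addIf (fun d => PySem.Int.mod d 2 = 0) _ _
        (((List.nodup_range).map hinj1).filter _) (by simp [PySem.Set.empty]),
      List.filter_map,
      List.filter_congr (fun k hk => show ((fun d => decide (PySem.Int.mod d 2 = 0)) ∘
          (fun k : Nat => ((k:Int)+1))) k = (fun k => decide (k % 2 = 1)) k by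
        simp only [Function.comp_apply]
        rw [PySem.Int.mod_eq_emod_of_pos (by norm_num), decide_eq_decide]
        omega),
      pv_filter_odd, List.map_map]
    simp only [PySem.Set.empty, List.nil_append]
    exact List.map_congr_left (fun i _ => by simp only [Function.comp_apply]; push_cast; ring)
  have esnd : (List.foldl (fun acc d => if PySem.Int.mod d 2 = 0 then acc else PySem.Set.add acc d)
      PySem.Set.empty ((List.range (n-1)).map (fun k : Nat => ((k:Int)+1))))
      = (List.range (n/2)).map (fun i : Nat => (2*(i:Int)+1)) := by
    rw [hbodyB,
      pv_foldl_addIf (fun d => ¬ PySem.Int.mod d 2 = 0) _ _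
        (((List.nodup_range).map hinj1).filter _) (by simp [PySem.Set.empty]),
      List.filter_map,
      List.filter_congr (fun k hk => show ((fun d => decide (¬ PySem.Int.mod d 2 = 0)) ∘
          (fun k : Nat => ((k:Int)+1))) k = (fun k => decide (k % 2 = 0)) k by
        simp only [Function.comp_apply]
        rw [PySem.Int.mod_eq_emod_of_pos (by norm_num), decide_eq_decide]
        omega),
      pv_filter_even, (by omega : (n-1+1)/2 = n/2), List.map_map]
    simp only [PySem.Set.empty, List.nil_append]
    exact List.map_congr_left (fun i _ => by simp only [Function.comp_apply]; push_cast; ring)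
  have hroot : (n:Int) ∉ (List.range (n/2)).map (fun i : Nat => (2*(i:Int)+1)) := by
    intro hmem
    simp only [List.mem_map, List.mem_range] at hmem
    obtain ⟨i, hi, he⟩ := hmem
    omega
  have hB : get_depth_sets_py_alt (n:Int)
      = ((List.range ((n-1)/2)).map (fun i : Nat => (2*(i:Int)+2)),
         (List.range (n/2)).map (fun i : Nat => (2*(i:Int)+1)) ++ [(n:Int)]) := by
    simp only [get_depth_sets_py_alt]
    rw [hgB, pv_foldl_pair]
    dsimp only
    rw [efst, esnd, PySem.Set.add_of_not_mem hroot]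
  -- A's value
  have hinj2 : Function.Injective (fun k : Nat => (2*(k:Int))) := by
    intro a b h; simp at h; omega
  have hinj3 : Function.Injective (fun k : Nat => (2*(k:Int)+1)) := by
    intro a b h; simp at h; omega
  have eA1 : (List.foldl (fun acc d => if ¬(d = 0 ∨ d = (n:Int)) then PySem.Set.add acc d else acc)
      PySem.Set.empty ((List.range (n/2+1)).map (fun k : Nat => (2*(k:Int)))))
      = (List.range ((n-1)/2)).map (fun i : Nat => (2*(i:Int)+2)) := by
    rw [pv_foldl_addIf (fun d => ¬(d = 0 ∨ d = (n:Int))) _ _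
        (((List.nodup_range).map hinj2).filter _) (by simp [PySem.Set.empty]),
      List.filter_map]
    simp only [PySem.Set.empty, List.nil_append]
    by_cases hp : n % 2 = 0
    · rw [List.range_succ, List.filter_append,
        List.filter_congr (l := List.range (n/2)) (fun k hk => show ((fun d => decide (¬(d = 0 ∨ d = (n:Int)))) ∘
            (fun k : Nat => (2*(k:Int)))) k = (fun k => decide (¬ k = 0)) k by
          simp only [Function.comp_apply, List.mem_range] at hk ⊢
          rw [decide_eq_decide]
          omega)]
      have hsing : (List.filter ((fun d => decide (¬(d = 0 ∨ d = (n:Int)))) ∘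
          (fun k : Nat => (2*(k:Int)))) [n/2]) = [] := by
        simp only [List.filter_cons, List.filter_nil, Function.comp_apply]
        rw [if_neg (by simp; omega)]
      rw [hsing, List.append_nil, (by omega : n/2 = (n-1)/2 + 1), pv_filter_pos, List.map_map]
      exact List.map_congr_left (fun i _ => by simp only [Function.comp_apply]; push_cast; ring)
    · rw [List.filter_congr (l := List.range (n/2+1)) (fun k hk => show ((fun d => decide (¬(d = 0 ∨ d = (n:Int)))) ∘
            (fun k : Nat => (2*(k:Int)))) k = (fun k => decide (¬ k = 0)) k by
          simp only [Function.comp_apply, List.mem_range] at hk ⊢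
          rw [decide_eq_decide]
          omega),
        (by omega : n/2+1 = (n-1)/2 + 1), pv_filter_pos, List.map_map]
      exact List.map_congr_left (fun i _ => by simp only [Function.comp_apply]; push_cast; ring)
  have eA2 : PySem.Set.ofList ((List.range ((n+1)/2)).map (fun k : Nat => (2*(k:Int)+1)))
      = (List.range ((n+1)/2)).map (fun k : Nat => (2*(k:Int)+1)) :=
    PySem.Set.ofList_eq_self_of_nodup _ ((List.nodup_range).map hinj3)
  have hA : get_depth_sets_py (n:Int)
      = ((List.range ((n-1)/2)).map (fun i : Nat => (2*(i:Int)+2)),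
         (List.range (n/2)).map (fun i : Nat => (2*(i:Int)+1)) ++ [(n:Int)]) := by
    simp only [get_depth_sets_py]
    rw [hgA, hgO, hbodyA, eA1, eA2]
    have hmodn : PySem.Int.mod ((n : Int)) 2 = ((n % 2 : Nat) : Int) := by
      exact_mod_cast PySem.Int.mod_natCast n 2
    rw [hmodn]
    by_cases hp : n % 2 = 0
    · rw [if_pos (by exact_mod_cast congrArg (Nat.cast : Nat → Int) hp),
        PySem.Set.add_of_not_mem (by
          intro hmem
          simp only [List.mem_map, List.mem_range] at hmem
          obtain ⟨i, hi, he⟩ := hmem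
          omega),
        (by omega : (n+1)/2 = n/2)]
    · rw [if_neg (by
          intro h
          have : n % 2 = 0 := by exact_mod_cast h
          exact hp this),
        (by omega : (n+1)/2 = n/2 + 1), List.range_succ, List.map_append]
      congr 2
      simp only [List.map_cons, List.map_nil]
      congr 1
      omega
  rw [hA, hB]



-- ===== VERDICT (by name: the statement is the Claim_ definition above) =====
theorem get_depth_sets_py_spec : Claim_unchanged_get_depth_sets_py := by
  intro m _ hnD
  rcases lt_trichotomy m 0 with hm | hm | hm
  · have hmod : PySem.Int.mod m 2 = 0 := by
      rcases PySem.Int.mod_two_eq m with h | h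
      · exact h
      · exact absurd ⟨hm, h⟩ hnD
    obtain ⟨h1, h2, h3⟩ := pv_neg_ranges m hm
    simp only [get_depth_sets_py, get_depth_sets_py_alt, h1, h2, h3, List.foldl_nil]
    rw [if_pos hmod]
    rfl
  · rw [hm]; decide
  · obtain ⟨k, rfl⟩ : ∃ k : Nat, m = (k:Int) := ⟨m.toNat, by omega⟩
    exact pv_pos_case k (by omega)

theorem get_depth_sets_py_changed : Claim_changed_get_depth_sets_py := by
  unfold Claim_changed_get_depth_sets_py; decide

theorem get_depth_sets_py_tight : Claim_exact_get_depth_sets_py := by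
  intro m _ hD heq
  obtain ⟨hm, hmod⟩ := hD
  obtain ⟨h1, h2, h3⟩ := pv_neg_ranges m hm
  simp only [get_depth_sets_py, get_depth_sets_py_alt, h1, h2, h3, List.foldl_nil] at heq
  rw [if_neg (by rw [hmod]; exact one_ne_zero)] at heq
  rw [PySem.Set.add_of_not_mem (by simp [PySem.Set.empty])] at heq
  simp [PySem.Set.empty, PySem.Set.ofList] at heq
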